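-- pv_equiv track=rewrite | github.com/Neptune-1/steiner_tree_level_generator | steiner_tree.py | line_to_one_lines
-- ===== SOURCE A (Python) =====
-- def line_to_one_lines(edge):
--     x1 = edge[0][0]
--     x2 = edge[1][0]
--     y1 = edge[0][1]
--     y2 = edge[1][1]
--     if x1 == x2:
--         return [[[x1, min(y1, y2) + dy - 1], [x1, min(y1, y2) + dy]] for dy in range(1, abs(y1 - y2) + 1)]
--     else:
--         return [[[min(x1, x2) + dx - 1, y1], [min(x1, x2) + dx, y1]] for dx in range(1, abs(x1 - x2) + 1)]
-- ===== SOURCE B (Python) =====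
-- def line_to_one_lines(edge):
--     x1, y1 = edge[0][0], edge[0][1]
--     x2, y2 = edge[1][0], edge[1][1]
--     if x1 == x2:
--         pts = [[x1, v] for v in range(min(y1, y2), max(y1, y2) + 1)]
--     else:
--         pts = [[v, y1] for v in range(min(x1, x2), max(x1, x2) + 1)]
--     return [[a, b] for a, b in zip(pts, pts[1:])]
-- ===== Notes on version B (the rewrite author's own statement) =====
-- stated objective: alternative
-- what changed: B builds the explicit list of unit-spaced points from min to max on the varying axis and then forms segments by zipping consecutive points, instead of A's direct index-arithmetic emission of each segment from range(1, |d|+1).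
import Mathlib
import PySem

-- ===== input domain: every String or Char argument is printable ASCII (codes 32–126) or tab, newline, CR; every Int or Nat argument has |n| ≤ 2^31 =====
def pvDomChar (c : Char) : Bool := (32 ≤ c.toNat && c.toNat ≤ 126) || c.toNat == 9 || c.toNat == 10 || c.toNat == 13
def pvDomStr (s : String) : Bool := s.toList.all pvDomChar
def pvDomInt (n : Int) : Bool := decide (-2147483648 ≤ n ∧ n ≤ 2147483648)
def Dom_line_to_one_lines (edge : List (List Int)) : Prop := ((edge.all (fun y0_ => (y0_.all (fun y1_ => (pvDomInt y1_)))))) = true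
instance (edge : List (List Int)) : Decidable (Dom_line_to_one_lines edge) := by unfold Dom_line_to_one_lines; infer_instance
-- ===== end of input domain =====

-- B builds the point list min→max on the varying axis and pairs consecutive points; same output as A.

-- ===== PORT A =====
def line_to_one_lines (edge : List (List Int)) : List (List (List Int)) :=
  let x1 := PySem.List.pyGetD (PySem.List.pyGetD edge 0 []) 0 0
  let x2 := PySem.List.pyGetD (PySem.List.pyGetD edge 1 []) 0 0
  let y1 := PySem.List.pyGetD (PySem.List.pyGetD edge 0 []) 1 0
  let y2 := PySem.List.pyGetD (PySem.List.pyGetD edge 1 []) 1 0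
  if x1 = x2 then
    (PySem.List.pyRange 1 (|y1 - y2| + 1) 1).map
      (fun dy => [[x1, min y1 y2 + dy - 1], [x1, min y1 y2 + dy]])
  else
    (PySem.List.pyRange 1 (|x1 - x2| + 1) 1).map
      (fun dx => [[min x1 x2 + dx - 1, y1], [min x1 x2 + dx, y1]])

-- ===== PORT B =====
def line_to_one_lines_alt (edge : List (List Int)) : List (List (List Int)) :=
  let x1 := PySem.List.pyGetD (PySem.List.pyGetD edge 0 []) 0 0
  let y1 := PySem.List.pyGetD (PySem.List.pyGetD edge 0 []) 1 0
  let x2 := PySem.List.pyGetD (PySem.List.pyGetD edge 1 []) 0 0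
  let y2 := PySem.List.pyGetD (PySem.List.pyGetD edge 1 []) 1 0
  let pts : List (List Int) :=
    if x1 = x2 then
      (PySem.List.pyRange (min y1 y2) (max y1 y2 + 1) 1).map (fun v => [x1, v])
    else
      (PySem.List.pyRange (min x1 x2) (max x1 x2 + 1) 1).map (fun v => [v, y1])
  (pts.zip (PySem.List.slice pts (some 1) none)).map (fun p => [p.1, p.2])

-- ===== PRECONDITION & SPEC =====
-- Pre_ excludes exactly the inputs on which the Python A raises IndexError: fewer than
-- two endpoints, or an endpoint with fewer than two coordinates.
def Pre_line_to_one_lines (edge : List (List Int)) : Prop :=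
  2 ≤ edge.length ∧ 2 ≤ (edge.getD 0 []).length ∧ 2 ≤ (edge.getD 1 []).length
instance (edge : List (List Int)) : Decidable (Pre_line_to_one_lines edge) := by
  unfold Pre_line_to_one_lines; infer_instance
def pvWitness_line_to_one_lines : List (List Int) := [[1, 2], [1, 5]]
def Spec_line_to_one_lines (edge : List (List Int)) (out : List (List (List Int))) : Prop := out = line_to_one_lines_alt edge
instance (edge : List (List Int)) (out : List (List (List Int))) : Decidable (Spec_line_to_one_lines edge out) := by unfold Spec_line_to_one_lines; infer_instance

-- ===== CLAIM (what is proved, stated in full; the proofs are below) =====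
def Claim_equal_line_to_one_lines : Prop := ∀ (edge : List (List Int)), Dom_line_to_one_lines edge → Pre_line_to_one_lines edge → Spec_line_to_one_lines edge (line_to_one_lines edge)

-- ===== LEMMAS AND PROOFS =====

-- pairing consecutive elements of (range n).map g
theorem zip_tail_map_range {α : Type} (g : Nat → α) (n : Nat) :
    ((List.range n).map g).zip (((List.range n).map g).tail)
      = (List.range (n - 1)).map (fun i => (g i, g (i + 1))) := by
  apply List.ext_getElem
  · simp
  · intro i h1 h2
    simp [List.getElem_tail]

-- pairing consecutive points of an Int range, restated as A's offset form
theorem zip_tail_pyRange {α : Type} (f : Int → α) (lo hi : Int) :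
    (((PySem.List.pyRange lo (hi + 1) 1).map f).zip
      (((PySem.List.pyRange lo (hi + 1) 1).map f).tail)).map (fun p => [p.1, p.2])
      = (PySem.List.pyRange 1 ((hi - lo) + 1) 1).map (fun d => [f (lo + d - 1), f (lo + d)]) := by
  rw [PySem.List.pyRange_one, PySem.List.pyRange_one, List.map_map,
      zip_tail_map_range (g := f ∘ fun k => (lo + (k : Int))) ((hi + 1 - lo).toNat), List.map_map, List.map_map]
  have hn : (hi + 1 - lo).toNat - 1 = (hi - lo + 1 - 1).toNat := by omega
  rw [hn]
  apply List.map_congr_left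
  intro k _
  have h1 : lo + ((k : Int) + 1) = lo + (1 + (k : Int)) := by ring
  have h2 : lo + (1 + (k : Int)) - 1 = lo + (k : Int) := by ring
  simp [Function.comp, h2]
  rw [h1]

-- ===== VERDICT (by name: the statement is the Claim_ definition above) =====
theorem line_to_one_lines_spec : Claim_equal_line_to_one_lines := by
  intro edge _ _
  unfold Spec_line_to_one_lines
  simp only [line_to_one_lines, line_to_one_lines_alt]
  by_cases h : PySem.List.pyGetD (PySem.List.pyGetD edge 0 []) 0 0
      = PySem.List.pyGetD (PySem.List.pyGetD edge 1 []) 0 0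
  · simp only [h, if_pos]
    rw [PySem.List.slice_from_one, zip_tail_pyRange]
    rw [show max (PySem.List.pyGetD (PySem.List.pyGetD edge 0 []) 1 0)
          (PySem.List.pyGetD (PySem.List.pyGetD edge 1 []) 1 0)
        - min (PySem.List.pyGetD (PySem.List.pyGetD edge 0 []) 1 0)
          (PySem.List.pyGetD (PySem.List.pyGetD edge 1 []) 1 0)
        = |PySem.List.pyGetD (PySem.List.pyGetD edge 0 []) 1 0
          - PySem.List.pyGetD (PySem.List.pyGetD edge 1 []) 1 0| from (max_sub_min_eq_abs _ _).trans (abs_sub_comm _ _)]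
  · simp only [h, if_false]
    rw [PySem.List.slice_from_one, zip_tail_pyRange]
    rw [show max (PySem.List.pyGetD (PySem.List.pyGetD edge 0 []) 0 0)
          (PySem.List.pyGetD (PySem.List.pyGetD edge 1 []) 0 0)
        - min (PySem.List.pyGetD (PySem.List.pyGetD edge 0 []) 0 0)
          (PySem.List.pyGetD (PySem.List.pyGetD edge 1 []) 0 0)
        = |PySem.List.pyGetD (PySem.List.pyGetD edge 0 []) 0 0
          - PySem.List.pyGetD (PySem.List.pyGetD edge 1 []) 0 0| from (max_sub_min_eq_abs _ _).trans (abs_sub_comm _ _)]
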